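-- pv_equiv track=rewrite | github.com/suimenqx/lua-nil-guard | src/lua_nil_guard/collector.py | _mask_lua_strings
-- ===== SOURCE A (Python) =====
-- def _mask_lua_strings(code: str) -> str:
--     chars = list(code)
--     quote: str | None = None
--     escape = False
--     for index, char in enumerate(chars):
--         if quote is None:
--             if char in {"'", '"'}:
--                 quote = char
--                 chars[index] = " "
--             continue
--         chars[index] = " "
--         if escape:
--             escape = False
--             continue
--         if char == "\\":
--             escape = True
--             continue
--         if char == quote:
--             quote = None
--     return "".join(chars)
-- ===== SOURCE B (Python) =====
-- def _mask_lua_strings(code: str) -> str: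
--     out = []
--     i = 0
--     n = len(code)
--     while i < n:
--         c = code[i]
--         if c in "'\"":
--             j = i + 1
--             while j < n:
--                 if code[j] == "\\":
--                     j += 2
--                 elif code[j] == c:
--                     j += 1
--                     break
--                 else:
--                     j += 1
--             j = min(j, n)
--             out.append(" " * (j - i))
--             i = j
--         else:
--             out.append(c)
--             i += 1
--     return "".join(out)
-- ===== Notes on version B (the rewrite author's own statement) =====
-- stated objective: alternative
-- what changed: A walks every character once mutating a char list under a (quote, escape) state machine; B is an index-jumping scanner: it copies plain text, and on a quote finds the matching close with an inner scan that skips escape pairs by jumping two positions, emitting one space-run per literal.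
import Mathlib
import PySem

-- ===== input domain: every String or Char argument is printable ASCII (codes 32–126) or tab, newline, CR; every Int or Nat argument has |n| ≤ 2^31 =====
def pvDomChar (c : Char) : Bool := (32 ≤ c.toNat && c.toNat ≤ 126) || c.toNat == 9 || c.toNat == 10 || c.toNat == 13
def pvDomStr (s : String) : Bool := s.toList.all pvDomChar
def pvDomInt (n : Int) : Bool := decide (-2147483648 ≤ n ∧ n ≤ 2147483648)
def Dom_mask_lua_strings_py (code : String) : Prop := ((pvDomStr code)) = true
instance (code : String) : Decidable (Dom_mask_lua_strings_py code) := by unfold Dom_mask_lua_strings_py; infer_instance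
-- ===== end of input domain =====

-- B replaces A's per-character (quote, escape) state machine by an index-jumping scanner
-- that emits whole space-runs per string literal; same output, different decomposition.

-- ===== PORT A =====
-- A's for-loop over list(code) with state (quote, escape), each position overwritten
-- with ' ' while inside a literal; ported as structural recursion carrying that state.
def maskA : List Char → Option Char → Bool → List Char
  | [], _, _ => []
  | c :: rest, none, e =>
      if c = '\'' ∨ c = '"' then ' ' :: maskA rest (some c) e
      else c :: maskA rest none e
  | c :: rest, some q, e =>
      if e then ' ' :: maskA rest (some q) false
      else if c = '\\' then ' ' :: maskA rest (some q) true
      else if c = q then ' ' :: maskA rest none e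
      else ' ' :: maskA rest (some q) e

def mask_lua_strings_py (code : String) : String :=
  String.mk (maskA code.toList none false)

-- ===== PORT B =====
-- B's inner while loop: from the char after the opening quote q, count consumed chars,
-- jumping two on a backslash, stopping after the first unescaped q (or at end of input).
def scanB (q : Char) : List Char → Nat × List Char
  | [] => (0, [])
  | c :: rest =>
      if c = '\\' then
        match rest with
        | [] => (1, [])
        | _ :: rest2 => ((scanB q rest2).1 + 2, (scanB q rest2).2)
      else if c = q then (1, rest)
      else ((scanB q rest).1 + 1, (scanB q rest).2)

theorem scanB_bs_nil (q : Char) : scanB q ['\\'] = (1, []) := by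
  rw [scanB.eq_def]; simp

theorem scanB_bs_cons (q d : Char) (rest2 : List Char) :
    scanB q ('\\' :: d :: rest2) = ((scanB q rest2).1 + 2, (scanB q rest2).2) := by
  rw [scanB.eq_def]; simp

theorem scanB_cons_close (q : Char) (rest : List Char) (h1 : ¬ q = '\\') :
    scanB q (q :: rest) = (1, rest) := by
  rw [scanB.eq_def]; simp [h1]

theorem scanB_cons_other (q c : Char) (rest : List Char) (h1 : ¬ c = '\\') (h2 : ¬ c = q) :
    scanB q (c :: rest) = ((scanB q rest).1 + 1, (scanB q rest).2) := by
  rw [scanB.eq_def]; simp [h1, h2]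

theorem scanB_len_aux (q : Char) : ∀ (n : Nat) (l : List Char), l.length ≤ n →
    (scanB q l).2.length ≤ l.length := by
  intro n
  induction n with
  | zero =>
      intro l h
      have hl : l = [] := List.eq_nil_of_length_eq_zero (Nat.le_zero.mp h)
      subst hl; simp [scanB]
  | succ n ih =>
      intro l h
      cases l with
      | nil => simp [scanB]
      | cons c rest =>
        by_cases hb : c = '\\'
        · subst hb
          cases rest with
          | nil => simp [scanB_bs_nil]
          | cons d r2 =>
            have h2 := ih r2 (by simp at h; omega)
            simp [scanB_bs_cons]; omega
        · by_cases hq : c = q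
          · subst hq; simp [scanB_cons_close c rest hb]
          · have h2 := ih rest (by simp at h; omega)
            simp [scanB_cons_other q c rest hb hq]; omega

theorem scanB_len (q : Char) (l : List Char) : (scanB q l).2.length ≤ l.length :=
  scanB_len_aux q l.length l (Nat.le_refl _)

-- B's outer while loop: copy plain characters, and on a quote emit one run of spaces
-- covering the whole literal and resume after it.
def maskB : List Char → List Char
  | [] => []
  | c :: rest =>
      if c = '\'' ∨ c = '"' then
        List.replicate ((scanB c rest).1 + 1) ' ' ++ maskB (scanB c rest).2
      else c :: maskB rest
termination_by l => l.length
decreasing_by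
  · have := scanB_len c rest; simp; omega
  · simp

def mask_lua_strings_py_alt (code : String) : String :=
  String.mk (maskB code.toList)

-- ===== PRECONDITION & SPEC =====
def Spec_mask_lua_strings_py (code : String) (out : String) : Prop := out = mask_lua_strings_py_alt code
instance (code : String) (out : String) : Decidable (Spec_mask_lua_strings_py code out) := by unfold Spec_mask_lua_strings_py; infer_instance

-- ===== CLAIM (what is proved, stated in full; the proofs are below) =====
def Claim_equal_mask_lua_strings_py : Prop := ∀ (code : String), Dom_mask_lua_strings_py code → Spec_mask_lua_strings_py code (mask_lua_strings_py code)

-- ===== LEMMAS AND PROOFS =====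

-- Joint invariant, by strong induction on length: inside a literal opened by q, A's
-- state machine writes exactly the run of spaces B's scanner counts; outside, they agree.
theorem maskA_eq_maskB (n : Nat) : ∀ l : List Char, l.length ≤ n →
    ((∀ q, maskA l (some q) false =
        List.replicate (scanB q l).1 ' ' ++ maskB (scanB q l).2)
     ∧ maskA l none false = maskB l) := by
  induction n with
  | zero =>
      intro l h
      have : l = [] := List.eq_nil_of_length_eq_zero (Nat.le_zero.mp h)
      subst this
      exact ⟨fun q => by simp [maskA, scanB, maskB], by simp [maskA, maskB]⟩
  | succ n ih =>
      intro l h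
      cases l with
      | nil => exact ⟨fun q => by simp [maskA, scanB, maskB], by simp [maskA, maskB]⟩
      | cons c rest =>
        have hr : rest.length ≤ n := by simp at h; omega
        constructor
        · intro q
          by_cases hb : c = '\\'
          · subst hb
            cases rest with
            | nil => simp [maskA, scanB_bs_nil, maskB]
            | cons d rest2 =>
              have h2 : rest2.length ≤ n := by simp at hr; omega
              have := (ih rest2 h2).1 q
              simp [maskA, scanB_bs_cons, this, List.replicate_succ]
          · by_cases hq : c = q
            · subst hq
              simp [maskA, scanB_cons_close c rest hb, hb, (ih rest hr).2,
                List.replicate_succ]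
            · have := (ih rest hr).1 q
              simp [maskA, scanB_cons_other q c rest hb hq, hb, hq, this,
                List.replicate_succ]
        · by_cases hc : c = '\'' ∨ c = '"'
          · have := (ih rest hr).1 c
            simp [maskA, maskB, hc, this, List.replicate_succ]
          · simp [maskA, maskB, hc, (ih rest hr).2]

-- ===== VERDICT (by name: the statement is the Claim_ definition above) =====
theorem mask_lua_strings_py_spec : Claim_equal_mask_lua_strings_py := by
  intro code _
  unfold Spec_mask_lua_strings_py mask_lua_strings_py mask_lua_strings_py_alt
  exact congrArg String.mk
    ((maskA_eq_maskB code.toList.length code.toList (Nat.le_refl _)).2)
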